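-- pv_equiv track=rewrite | github.com/holbizmetrics/prime-alphabet-finder | deep_analysis.py | count_syllables_approx
-- ===== SOURCE A (Python) =====
-- def count_syllables_approx(s):
--     """Rough syllable count based on vowel groups"""
--     s = s.lower()
--     count = 0
--     prev_vowel = False
--     for c in s:
--         is_vowel = c in 'aeiou'
--         if is_vowel and not prev_vowel:
--             count += 1
--         prev_vowel = is_vowel
--     return max(count, 1)
-- ===== SOURCE B (Python) =====
-- def count_syllables_approx(s):
--     """Rough syllable count: each vowel group has (vowels in it) - (internal
--     adjacent vowel pairs) = 1, so groups = total vowels - adjacent vowel pairs."""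
--     v = [c in 'aeiou' for c in s.lower()]
--     vowels = sum(v)
--     doubles = sum(1 for a, b in zip(v, v[1:]) if a and b)
--     return max(vowels - doubles, 1)
-- ===== Notes on version B (the rewrite author's own statement) =====
-- stated objective: alternative
-- what changed: Replaces the stateful prev_vowel edge-detection scan by an arithmetic identity: vowel groups = (number of vowel characters) minus (number of adjacent vowel-vowel pairs), computed from two independent aggregate counts over the flag list and its zip with its own tail.
import Mathlib
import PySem

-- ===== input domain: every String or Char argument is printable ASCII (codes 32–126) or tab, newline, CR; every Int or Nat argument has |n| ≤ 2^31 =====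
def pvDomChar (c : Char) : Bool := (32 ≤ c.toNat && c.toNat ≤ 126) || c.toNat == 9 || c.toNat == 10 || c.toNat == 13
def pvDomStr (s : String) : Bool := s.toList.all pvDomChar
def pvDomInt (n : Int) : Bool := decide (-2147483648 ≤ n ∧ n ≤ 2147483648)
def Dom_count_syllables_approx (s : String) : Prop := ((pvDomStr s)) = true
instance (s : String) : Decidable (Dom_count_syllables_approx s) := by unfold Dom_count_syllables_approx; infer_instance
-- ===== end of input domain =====

-- B replaces A's prev_vowel edge-detection scan with the arithmetic identity groups = #vowels − #adjacent vowel pairs (alternative decomposition, same cost).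


-- ===== PORT A =====
-- A: fold over the lowered characters carrying (count, prev_vowel); `c in 'aeiou'` is single-char membership.
def pvIsVowel (c : Char) : Bool := "aeiou".toList.contains c

-- one iteration of A's for-loop body (state = (count, prev_vowel))
def pvStepA (st : Int × Bool) (c : Char) : Int × Bool :=
  let isV := pvIsVowel c
  (if isV && !st.2 then st.1 + 1 else st.1, isV)

def count_syllables_approx (s : String) : Int :=
  let t := (PySem.Str.lower s).toList
  let r := t.foldl pvStepA (0, false)
  max r.1 1

-- ===== PORT B =====
-- B: flag list, then two aggregate counts: total vowels and adjacent vowel-vowel pairs (zip with tail).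
def count_syllables_approx_alt (s : String) : Int :=
  let v := (PySem.Str.lower s).toList.map pvIsVowel
  let vowels : Int := (v.count true : Int)
  let doubles : Int := ((v.zip v.tail).countP (fun p => p.1 && p.2) : Int)
  max (vowels - doubles) 1

-- ===== PRECONDITION & SPEC =====
def Spec_count_syllables_approx (s : String) (out : Int) : Prop := out = count_syllables_approx_alt s
instance (s : String) (out : Int) : Decidable (Spec_count_syllables_approx s out) := by unfold Spec_count_syllables_approx; infer_instance

-- ===== CLAIM (what is proved, stated in full; the proofs are below) =====
def Claim_equal_count_syllables_approx : Prop := ∀ (s : String), Dom_count_syllables_approx s → Spec_count_syllables_approx s (count_syllables_approx s)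

-- ===== LEMMAS AND PROOFS =====
-- rising-edge count of a boolean list relative to a previous flag (abstracts A's loop)
def pvRise (prev : Bool) : List Bool → Int
  | [] => 0
  | b :: r => (if b && !prev then 1 else 0) + pvRise b r

-- adjacent-pair count of a boolean list relative to a previous flag
def pvPairs (prev : Bool) : List Bool → Int
  | [] => 0
  | b :: r => (if prev && b then 1 else 0) + pvPairs b r

theorem pv_fold_eq_rise (l : List Char) : ∀ (cnt : Int) (prev : Bool),
    (l.foldl pvStepA (cnt, prev)).1 = cnt + pvRise prev (l.map pvIsVowel) := by
  induction l with
  | nil => intro cnt prev; simp [pvRise]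
  | cons c r ih =>
    intro cnt prev
    simp only [List.foldl, List.map, pvRise, pvStepA, ih]
    by_cases h : pvIsVowel c = true <;> cases prev <;> simp [h] <;> ring

theorem pv_rise_eq (b : List Bool) : ∀ (prev : Bool),
    pvRise prev b = (b.count true : Int) - pvPairs prev b := by
  induction b with
  | nil => intro prev; simp [pvRise, pvPairs]
  | cons x r ih =>
    intro prev
    cases x <;> cases prev <;>
      simp [pvRise, pvPairs, List.count_cons, ih] <;> ring

theorem pv_pairs_eq_zip (b : List Bool) : ∀ (prev : Bool),
    pvPairs prev b
      = (if prev && b.headD false then 1 else 0)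
        + ((b.zip b.tail).countP (fun p => p.1 && p.2) : Int) := by
  induction b with
  | nil => intro prev; simp [pvPairs]
  | cons x r ih =>
    intro prev
    cases r with
    | nil => simp [pvPairs]
    | cons y r' =>
      rw [show pvPairs prev (x::y::r')
            = (if prev && x then 1 else 0) + pvPairs x (y::r') from rfl, ih x]
      simp only [List.headD]
      by_cases h : (x && y) = true <;> simp [h] <;> ring

-- ===== VERDICT (by name: the statement is the Claim_ definition above) =====
theorem count_syllables_approx_spec : Claim_equal_count_syllables_approx := by
  intro s _
  unfold Spec_count_syllables_approx count_syllables_approx count_syllables_approx_alt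
  simp only [pv_fold_eq_rise, pv_rise_eq, pv_pairs_eq_zip]
  simp
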